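-- pv_equiv track=rewrite | github.com/lyuwen/devrun | devrun/utils/slurm.py | aggregate_array_status
-- ===== SOURCE A (Python) =====
-- _FAILURE_STATES = frozenset({
--     "failed", "timeout", "out_of_memory", "node_fail",
--     "preempted", "boot_fail", "deadline", "stopped",
-- })
--
-- _ACTIVE_STATES = frozenset({"running", "pending", "completing", "suspended", "requeued", "resizing"})
--
-- def aggregate_array_status(task_counts: dict[str, int]) -> str:
--     """Derive an overall job status from per-task state counts.
--
--     Priority:
--     1. Any active state (running, pending, …) → ``"running"``
--     2. All completed → ``"completed"``
--     3. All cancelled → ``"cancelled"``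
--     4. Any failure-like state among terminal tasks → ``"failed"``
--     5. Otherwise → ``"unknown"``
--     """
--     if not task_counts:
--         return "unknown"
--
--     has_active = any(task_counts.get(s, 0) > 0 for s in _ACTIVE_STATES)
--     if has_active:
--         return "running"
--
--     has_failure = any(task_counts.get(s, 0) > 0 for s in _FAILURE_STATES)
--     total = sum(task_counts.values())
--     completed = task_counts.get("completed", 0)
--     cancelled = task_counts.get("cancelled", 0)
--
--     if completed == total:
--         return "completed"
--     if cancelled == total:
--         return "cancelled"
--     if has_failure:
--         return "failed"
--     return "unknown"
-- ===== SOURCE B (Python) =====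
-- _FAILURE_STATES = frozenset({
--     "failed", "timeout", "out_of_memory", "node_fail",
--     "preempted", "boot_fail", "deadline", "stopped",
-- })
--
-- _ACTIVE_STATES = frozenset({"running", "pending", "completing", "suspended", "requeued", "resizing"})
--
--
-- def aggregate_array_status(task_counts: dict[str, int]) -> str:
--     """Single pass over items instead of several scans/lookups."""
--     if not task_counts:
--         return "unknown"
--     total = 0
--     has_active = False
--     has_failure = False
--     completed = 0
--     cancelled = 0
--     for state, count in task_counts.items():
--         total += count
--         if count > 0:
--             if state in _ACTIVE_STATES:
--                 has_active = True
--             elif state in _FAILURE_STATES: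
--                 has_failure = True
--         if state == "completed":
--             completed = count
--         elif state == "cancelled":
--             cancelled = count
--     if has_active:
--         return "running"
--     if completed == total:
--         return "completed"
--     if cancelled == total:
--         return "cancelled"
--     if has_failure:
--         return "failed"
--     return "unknown"
-- ===== Notes on version B (the rewrite author's own statement) =====
-- stated objective: simpler
-- what changed: Replaces A's multiple passes (two `any` scans over the state frozensets doing dict lookups, a separate sum of values, and two more lookups) with one fold over task_counts.items() that accumulates total, has_active, has_failure, completed and cancelled, then applies the same priority chain.
import Mathlib
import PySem

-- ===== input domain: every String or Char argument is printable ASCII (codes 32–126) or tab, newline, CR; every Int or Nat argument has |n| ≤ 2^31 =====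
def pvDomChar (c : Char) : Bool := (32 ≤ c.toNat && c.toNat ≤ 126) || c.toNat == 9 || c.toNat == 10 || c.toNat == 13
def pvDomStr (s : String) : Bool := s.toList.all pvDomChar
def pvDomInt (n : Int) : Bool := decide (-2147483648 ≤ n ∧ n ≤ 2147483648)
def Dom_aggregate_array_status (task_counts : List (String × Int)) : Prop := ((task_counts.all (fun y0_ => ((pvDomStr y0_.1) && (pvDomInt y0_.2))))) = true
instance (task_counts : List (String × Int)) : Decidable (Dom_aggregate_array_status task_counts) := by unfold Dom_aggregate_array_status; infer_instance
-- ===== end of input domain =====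

-- B replaces A's several scans (two `any` passes over the state sets with dict lookups, a sum
-- of the values, two more lookups) by a single pass over the items; objective: simpler/alternative.

-- ===== PORT A =====
def pvFailureStates : List String :=
  ["failed", "timeout", "out_of_memory", "node_fail",
   "preempted", "boot_fail", "deadline", "stopped"]

def pvActiveStates : List String :=
  ["running", "pending", "completing", "suspended", "requeued", "resizing"]

def aggregate_array_status (task_counts : List (String × Int)) : String :=
  if task_counts = [] then "unknown"
  else
    let d := PySem.Dict.mk task_counts
    let has_active := pvActiveStates.any (fun s => decide (0 < d.getD s 0))
    if has_active then "running"
    else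
      let has_failure := pvFailureStates.any (fun s => decide (0 < d.getD s 0))
      let total := d.values.sum
      let completed := d.getD "completed" 0
      let cancelled := d.getD "cancelled" 0
      if completed = total then "completed"
      else if cancelled = total then "cancelled"
      else if has_failure then "failed"
      else "unknown"

-- ===== PORT B =====
-- the body of Source B's single for-loop, as the foldl step over (total, has_active, has_failure, completed, cancelled)
def pvStepB (acc : Int × Bool × Bool × Int × Int) (p : String × Int) : Int × Bool × Bool × Int × Int :=
  let total := acc.1 + p.2
  let af : Bool × Bool :=
    if 0 < p.2 then
      if pvActiveStates.contains p.1 then (true, acc.2.2.1)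
      else if pvFailureStates.contains p.1 then (acc.2.1, true)
      else (acc.2.1, acc.2.2.1)
    else (acc.2.1, acc.2.2.1)
  let cc : Int × Int :=
    if p.1 = "completed" then (p.2, acc.2.2.2.2)
    else if p.1 = "cancelled" then (acc.2.2.2.1, p.2)
    else (acc.2.2.2.1, acc.2.2.2.2)
  (total, af.1, af.2, cc.1, cc.2)

def aggregate_array_status_alt (task_counts : List (String × Int)) : String :=
  if task_counts = [] then "unknown"
  else
    let st := task_counts.foldl pvStepB (0, false, false, 0, 0)
    if st.2.1 then "running"
    else if st.2.2.2.1 = st.1 then "completed"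
    else if st.2.2.2.2 = st.1 then "cancelled"
    else if st.2.2.1 then "failed"
    else "unknown"

-- ===== PRECONDITION & SPEC =====
-- Pre_ requires distinct keys: the Python argument is a dict, which cannot hold duplicate keys;
-- on duplicate-key association lists (which encode no Python input) the two ports may disagree.
def Pre_aggregate_array_status (task_counts : List (String × Int)) : Prop :=
  (task_counts.map Prod.fst).Nodup
instance (task_counts : List (String × Int)) : Decidable (Pre_aggregate_array_status task_counts) := by unfold Pre_aggregate_array_status; infer_instance

def pvWitness_aggregate_array_status : (List (String × Int)) := [("completed", 2), ("failed", 1)]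

def Spec_aggregate_array_status (task_counts : List (String × Int)) (out : String) : Prop := out = aggregate_array_status_alt task_counts
instance (task_counts : List (String × Int)) (out : String) : Decidable (Spec_aggregate_array_status task_counts out) := by unfold Spec_aggregate_array_status; infer_instance

-- ===== CLAIM (what is proved, stated in full; the proofs are below) =====
def Claim_equal_aggregate_array_status : Prop := ∀ (task_counts : List (String × Int)), Dom_aggregate_array_status task_counts → Pre_aggregate_array_status task_counts → Spec_aggregate_array_status task_counts (aggregate_array_status task_counts)

-- ===== LEMMAS AND PROOFS =====

-- B's cumulative flags/lookups, in closed form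
def pvAnyA (tc : List (String × Int)) : Bool :=
  tc.any (fun p => decide (0 < p.2) && pvActiveStates.contains p.1)
def pvAnyF (tc : List (String × Int)) : Bool :=
  tc.any (fun p => decide (0 < p.2) && !pvActiveStates.contains p.1 && pvFailureStates.contains p.1)
def pvLast (k : String) (tc : List (String × Int)) (c : Int) : Int :=
  tc.foldl (fun c p => if p.1 = k then p.2 else c) c

lemma pv_disjoint (s : String) (h : s ∈ pvFailureStates) : s ∉ pvActiveStates := by
  fin_cases h <;> decide

lemma pv_step_eq (t : Int) (a f : Bool) (c x : Int) (p : String × Int) :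
    pvStepB (t, a, f, c, x) p =
      (t + p.2,
       a || (decide (0 < p.2) && pvActiveStates.contains p.1),
       f || (decide (0 < p.2) && !pvActiveStates.contains p.1 && pvFailureStates.contains p.1),
       if p.1 = "completed" then p.2 else c,
       if p.1 = "cancelled" then p.2 else x) := by
  unfold pvStepB
  by_cases hp : 0 < p.2
  · by_cases ha : pvActiveStates.contains p.1 = true
    · simp [hp]
      split_ifs with h1 h2 <;> simp_all
    · by_cases hf : pvFailureStates.contains p.1 = true
      · simp [hp]
        split_ifs with h1 h2 <;> simp_all
      · simp [hp]
        split_ifs with h1 h2 <;> simp_all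
  · simp [hp]
    split_ifs with h1 h2 <;> simp_all

lemma pv_foldB (tc : List (String × Int)) (t : Int) (a f : Bool) (c x : Int) :
    tc.foldl pvStepB (t, a, f, c, x) =
      (t + (tc.map Prod.snd).sum, a || pvAnyA tc, f || pvAnyF tc,
       pvLast "completed" tc c, pvLast "cancelled" tc x) := by
  induction tc generalizing t a f c x with
  | nil => simp [pvAnyA, pvAnyF, pvLast]
  | cons p rest ih =>
    rw [List.foldl_cons, pv_step_eq, ih]
    simp only [pvAnyA, pvAnyF, pvLast, List.any_cons, List.map_cons, List.sum_cons,
      List.foldl_cons, Bool.or_assoc]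
    refine Prod.ext (by ring) (Prod.ext rfl (Prod.ext rfl (Prod.ext rfl rfl)))

lemma pvLast_of_not_mem (k : String) (tc : List (String × Int)) (c : Int)
    (h : k ∉ tc.map Prod.fst) : pvLast k tc c = c := by
  induction tc generalizing c with
  | nil => rfl
  | cons p rest ih =>
    simp only [List.map_cons, List.mem_cons, not_or] at h
    simp only [pvLast, List.foldl_cons] at *
    rw [if_neg (fun hh => h.1 hh.symm)]
    exact ih c h.2

lemma pvLast_eq_getD (k : String) (tc : List (String × Int))
    (h : (tc.map Prod.fst).Nodup) :
    pvLast k tc 0 = (PySem.Dict.mk tc).getD k 0 := by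
  induction tc with
  | nil => rfl
  | cons p rest ih =>
    simp only [List.map_cons, List.nodup_cons] at h
    have hget : (PySem.Dict.mk (p :: rest)).getD k 0 =
        if p.1 == k then p.2 else (PySem.Dict.mk rest).getD k 0 := by
      rw [PySem.Dict.getD_eq_get?_getD, PySem.Dict.get?_mk_cons]
      split_ifs <;> simp [PySem.Dict.getD_eq_get?_getD]
    rw [hget]
    by_cases hk : p.1 = k
    · rw [if_pos (by simp [hk])]
      simp only [pvLast, List.foldl_cons, if_pos hk]
      exact pvLast_of_not_mem k rest p.2 (hk ▸ h.1)
    · rw [if_neg (by simp [hk])]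
      simp only [pvLast, List.foldl_cons, if_neg hk]
      exact ih h.2

lemma pv_any_getD (states : List String) (tc : List (String × Int))
    (h : (tc.map Prod.fst).Nodup) :
    (states.any fun s => decide (0 < (PySem.Dict.mk tc).getD s 0)) =
      tc.any (fun p => decide (0 < p.2) && states.contains p.1) := by
  have hk : (PySem.Dict.mk tc).keys.Nodup := by simpa [PySem.Dict.keys] using h
  rw [Bool.eq_iff_iff]
  simp only [List.any_eq_true, decide_eq_true_eq, Bool.and_eq_true, List.contains_eq_mem]
  constructor
  · rintro ⟨s, hs, hpos⟩
    rcases hv : (PySem.Dict.mk tc).get? s with _ | v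
    · rw [PySem.Dict.getD_eq_get?_getD, hv] at hpos; simp at hpos
    · have hmem := PySem.Dict.mem_items_of_get?_eq_some (d := PySem.Dict.mk tc) hv
      rw [PySem.Dict.getD_eq_get?_getD, hv] at hpos
      exact ⟨(s, v), hmem, by simpa using hpos, by simpa using hs⟩
  · rintro ⟨p, hp, hpos, hs⟩
    refine ⟨p.1, by simpa using hs, ?_⟩
    have : (PySem.Dict.mk tc).getD p.1 0 = p.2 :=
      PySem.Dict.getD_of_mem_items (d := PySem.Dict.mk tc) (by simpa using hp) hk 0
    rw [this]; exact hpos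

lemma pvAnyF_simple (tc : List (String × Int)) :
    pvAnyF tc = tc.any (fun p => decide (0 < p.2) && pvFailureStates.contains p.1) := by
  unfold pvAnyF
  rw [Bool.eq_iff_iff]
  simp only [List.any_eq_true, Bool.and_eq_true, decide_eq_true_eq, Bool.not_eq_true',
    List.contains_eq_mem]
  constructor
  · rintro ⟨p, hp, ⟨h1, _⟩, h3⟩
    exact ⟨p, hp, h1, h3⟩
  · rintro ⟨p, hp, h1, h3⟩
    refine ⟨p, hp, ⟨h1, ?_⟩, h3⟩
    simpa using pv_disjoint p.1 (by simpa using h3)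

-- ===== VERDICT (by name: the statement is the Claim_ definition above) =====
theorem aggregate_array_status_spec : Claim_equal_aggregate_array_status := by
  intro tc _ hpre
  unfold Spec_aggregate_array_status aggregate_array_status aggregate_array_status_alt
  by_cases hnil : tc = []
  · simp [hnil]
  · rw [if_neg hnil, if_neg hnil]
    rw [pv_foldB]
    have hv : (PySem.Dict.mk tc).values = tc.map Prod.snd := rfl
    simp only [Bool.false_or, pvAnyA, zero_add]
    rw [pvAnyF_simple, pv_any_getD pvActiveStates tc hpre, pv_any_getD pvFailureStates tc hpre,
        pvLast_eq_getD _ _ hpre, pvLast_eq_getD _ _ hpre, hv]
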